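-- pv_equiv track=rewrite | github.com/Julipears/Python-projects | Semantic_similarity.py | build_semantic_descriptors
-- ===== SOURCE A (Python) =====
-- def build_semantic_descriptors(sentences):
--     words_dict = {}
--     for sent in sentences:
--         words_in_sent = set(sent)
--         for word_key in words_in_sent:
--             # Initilize each value of words_dict as a dictionary
--             if word_key not in words_dict.keys():
--                 words_dict[word_key] = {}
--
--             # Within the dictionary of the dictionary, check
--             # build a frequency table
--             for word in words_in_sent:
--                 # Don't add the word to its own frequency table
--                 if word != word_key:
--                     cur_value = words_dict[word_key].get(word, 0)
--                     words_dict[word_key].update({word: cur_value + 1})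
--
--     return words_dict
-- ===== SOURCE B (Python) =====
-- def _pairs(words):
--     # all unordered pairs of distinct positions (combinations of length 2)
--     if not words:
--         return []
--     head, tail = words[0], words[1:]
--     return [(head, b) for b in tail] + _pairs(tail)
--
--
-- def build_semantic_descriptors(sentences):
--     words_dict = {}
--     for sent in sentences:
--         words = list(set(sent))
--         for w in words:
--             words_dict.setdefault(w, {})
--         for a, b in _pairs(words):
--             words_dict[a][b] = words_dict[a].get(b, 0) + 1
--             words_dict[b][a] = words_dict[b].get(a, 0) + 1
--     return words_dict
-- ===== Notes on version B (the rewrite author's own statement) =====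
-- stated objective: alternative
-- what changed: A fills the co-occurrence table with an ordered double loop over set(sent) that skips word==word_key; B initialises each word's entry once with setdefault and then walks the unordered pairs (combinations of length 2) of the sentence's word set once, updating both sides of the symmetric table per pair.
import Mathlib
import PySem

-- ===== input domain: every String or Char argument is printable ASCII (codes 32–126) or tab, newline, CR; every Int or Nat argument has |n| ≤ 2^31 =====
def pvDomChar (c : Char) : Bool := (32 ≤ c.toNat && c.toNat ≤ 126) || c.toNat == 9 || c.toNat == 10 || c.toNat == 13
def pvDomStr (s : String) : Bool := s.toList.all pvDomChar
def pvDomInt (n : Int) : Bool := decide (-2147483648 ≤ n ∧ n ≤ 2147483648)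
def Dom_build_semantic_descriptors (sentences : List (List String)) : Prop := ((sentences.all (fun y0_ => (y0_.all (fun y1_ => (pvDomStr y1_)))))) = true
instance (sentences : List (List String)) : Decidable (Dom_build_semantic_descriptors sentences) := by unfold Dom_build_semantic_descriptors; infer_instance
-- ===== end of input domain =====

-- B replaces A's ordered double loop (with self-skip) over each sentence's word set by one pass
-- over the unordered pairs of that set, updating both sides of the symmetric table per pair
-- (objective: alternative decomposition of the same quadratic work).
-- The equivalence is about the returned value; neither program mutates its argument.

-- ===== PORT A =====
def build_semantic_descriptors (sentences : List (List String)) : List (String × List (String × Int)) :=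
  (sentences.foldl (fun words_dict sent =>
      let words_in_sent : PySem.Set String := PySem.Set.ofList sent
      words_in_sent.foldl (fun words_dict word_key =>
        -- if word_key not in words_dict.keys(): words_dict[word_key] = {}
        let words_dict := if words_dict.contains word_key then words_dict
          else words_dict.insert word_key PySem.Dict.empty
        words_in_sent.foldl (fun words_dict word =>
          if word ≠ word_key then
            -- cur_value = words_dict[word_key].get(word, 0); words_dict[word_key].update({word: cur_value + 1})
            words_dict.modify word_key PySem.Dict.empty
              (fun m => m.insert word (m.getD word 0 + 1))
          else words_dict) words_dict) words_dict)
    (PySem.Dict.empty : PySem.Dict String (PySem.Dict String Int))).items.map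
    (fun p => (p.1, p.2.items))

-- ===== PORT B =====
-- _pairs(words): recursion on the list, head paired with each later element, then the tail's pairs
def pvPairs (words : List String) : List (String × String) :=
  match words with
  | [] => []
  | head :: tail => tail.map (fun b => (head, b)) ++ pvPairs tail

def build_semantic_descriptors_alt (sentences : List (List String)) : List (String × List (String × Int)) :=
  (sentences.foldl (fun words_dict sent =>
      let words : PySem.Set String := PySem.Set.ofList sent
      let words_dict := words.foldl (fun d w => d.setdefault w PySem.Dict.empty) words_dict
      (pvPairs words).foldl (fun d q =>
          -- words_dict[a][b] = words_dict[a].get(b, 0) + 1 ; words_dict[b][a] = words_dict[b].get(a, 0) + 1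
          let d := d.modify q.1 PySem.Dict.empty (fun m => m.insert q.2 (m.getD q.2 0 + 1))
          d.modify q.2 PySem.Dict.empty (fun m => m.insert q.1 (m.getD q.1 0 + 1)))
        words_dict)
    (PySem.Dict.empty : PySem.Dict String (PySem.Dict String Int))).items.map
    (fun p => (p.1, p.2.items))

-- ===== PRECONDITION & SPEC =====
def Spec_build_semantic_descriptors (sentences : List (List String)) (out : List (String × List (String × Int))) : Prop := out = build_semantic_descriptors_alt sentences
instance (sentences : List (List String)) (out : List (String × List (String × Int))) : Decidable (Spec_build_semantic_descriptors sentences out) := by unfold Spec_build_semantic_descriptors; infer_instance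

-- ===== CLAIM (what is proved, stated in full; the proofs are below) =====
def Claim_equal_build_semantic_descriptors : Prop := ∀ (sentences : List (List String)), Dom_build_semantic_descriptors sentences → Spec_build_semantic_descriptors sentences (build_semantic_descriptors sentences)

-- ===== LEMMAS AND PROOFS =====

-- the word-table type and the two atomic operations both programs perform
abbrev pvWD := PySem.Dict String (PySem.Dict String Int)

def pvIncr (d : pvWD) (a w : String) : pvWD :=
  d.modify a PySem.Dict.empty (fun m => m.insert w (m.getD w 0 + 1))

def pvEnsure (d : pvWD) (a : String) : pvWD :=
  if d.contains a then d else d.insert a PySem.Dict.empty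

def pvIncrs (a : String) (L : List String) (d : pvWD) : pvWD :=
  L.foldl (fun d w => pvIncr d a w) d

def pvIncTo (c : String) (L : List String) (d : pvWD) : pvWD :=
  L.foldl (fun d x => pvIncr d x c) d

def pvIncToAll (p L : List String) (d : pvWD) : pvWD :=
  p.foldl (fun d c => pvIncTo c L d) d

def pvEns (L : List String) (d : pvWD) : pvWD :=
  L.foldl pvEnsure d

def pvPairOp (d : pvWD) (q : String × String) : pvWD :=
  pvIncr (pvIncr d q.1 q.2) q.2 q.1

-- two inserts at distinct keys commute when at least one key is already present
lemma pvInsert_comm {ν : Type} (d : PySem.Dict String ν) (a b : String) (va vb : ν)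
    (hab : a ≠ b) (h : d.contains a = true ∨ d.contains b = true) :
    (d.insert a va).insert b vb = (d.insert b vb).insert a va := by
  have hba : b ≠ a := hab.symm
  apply PySem.Dict.ext
  by_cases ca : d.contains a = true <;> by_cases cb : d.contains b = true
  · simp only [PySem.Dict.items_insert, PySem.Dict.contains_insert, ca, cb,
      beq_iff_eq, Bool.or_true, if_true, List.map_map]
    apply List.map_congr_left
    intro p _
    by_cases h1 : p.1 = a <;> by_cases h2 : p.1 = b <;>
      simp_all [Function.comp]
  · simp [PySem.Dict.items_insert, PySem.Dict.contains_insert, ca, cb, hba]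
  · simp [PySem.Dict.items_insert, PySem.Dict.contains_insert, ca, cb, hab]
  · tauto

lemma pvContains_pvIncr (d : pvWD) (a w x : String) :
    (pvIncr d a w).contains x = (x == a || d.contains x) := by
  simp [pvIncr, PySem.Dict.modify, PySem.Dict.contains_insert]

lemma pvContains_pvEnsure (d : pvWD) (a x : String) :
    (pvEnsure d a).contains x = (x == a || d.contains x) := by
  unfold pvEnsure
  split_ifs with hc
  · by_cases hx : x = a <;> simp [hx, hc]
  · simp [PySem.Dict.contains_insert]

lemma pvIncr_comm (d : pvWD) (a b w w' : String) (hab : a ≠ b)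
    (h : d.contains a = true ∨ d.contains b = true) :
    pvIncr (pvIncr d a w) b w' = pvIncr (pvIncr d b w') a w := by
  have hba : b ≠ a := hab.symm
  simp only [pvIncr, PySem.Dict.modify]
  rw [PySem.Dict.getD_insert_of_ne _ _ _ hba, PySem.Dict.getD_insert_of_ne _ _ _ hab]
  exact pvInsert_comm d a b _ _ hab h

lemma pvEnsure_pvIncr_comm (d : pvWD) (a b w : String) (hab : a ≠ b)
    (ha : d.contains a = true) :
    pvEnsure (pvIncr d a w) b = pvIncr (pvEnsure d b) a w := by
  have hba : b ≠ a := hab.symm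
  unfold pvEnsure
  rw [pvContains_pvIncr]
  by_cases cb : d.contains b = true
  · simp [cb]
  · have hb : ((b == a) || d.contains b) = false := by simp [hba, cb]
    rw [hb]
    simp only [Bool.false_eq_true, if_false, cb]
    simp only [pvIncr, PySem.Dict.modify]
    rw [PySem.Dict.getD_insert_of_ne _ _ _ hab]
    exact pvInsert_comm d a b _ _ hab (Or.inl ha)

-- cons unfoldings of the loop runs
lemma pvIncrs_cons (a w : String) (L : List String) (d : pvWD) :
    pvIncrs a (w :: L) d = pvIncrs a L (pvIncr d a w) := rfl

lemma pvIncTo_cons (c x : String) (L : List String) (d : pvWD) :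
    pvIncTo c (x :: L) d = pvIncTo c L (pvIncr d x c) := rfl

lemma pvEns_cons (x : String) (L : List String) (d : pvWD) :
    pvEns (x :: L) d = pvEns L (pvEnsure d x) := rfl

lemma pvIncToAll_cons' (c : String) (p L : List String) (d : pvWD) :
    pvIncToAll (c :: p) L d = pvIncToAll p L (pvIncTo c L d) := rfl

-- presence is preserved by the loop bodies
lemma pvContains_pvIncr_self (d : pvWD) (a w : String) :
    (pvIncr d a w).contains a = true := by
  simp [pvContains_pvIncr]

lemma pvContains_pvIncrs (a : String) (L : List String) (d : pvWD) (c : String)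
    (h : d.contains c = true) : (pvIncrs a L d).contains c = true := by
  induction L generalizing d with
  | nil => exact h
  | cons w L ih =>
      rw [pvIncrs_cons]
      exact ih _ (by rw [pvContains_pvIncr, h, Bool.or_true])

lemma pvContains_pvEns (L : List String) (d : pvWD) (c : String)
    (h : d.contains c = true) : (pvEns L d).contains c = true := by
  induction L generalizing d with
  | nil => exact h
  | cons x L ih =>
      rw [pvEns_cons]
      exact ih _ (by rw [pvContains_pvEnsure, h, Bool.or_true])

lemma pvContains_pvIncTo (c : String) (L : List String) (d : pvWD) (c' : String)
    (h : d.contains c' = true) : (pvIncTo c L d).contains c' = true := by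
  induction L generalizing d with
  | nil => exact h
  | cons x L ih =>
      rw [pvIncTo_cons]
      exact ih _ (by rw [pvContains_pvIncr, h, Bool.or_true])

lemma pvContains_pvIncToAll (p L : List String) (d : pvWD) (c' : String)
    (h : d.contains c' = true) : (pvIncToAll p L d).contains c' = true := by
  induction p generalizing d with
  | nil => exact h
  | cons c p ih =>
      rw [pvIncToAll_cons']
      exact ih _ (pvContains_pvIncTo c L d c' h)

-- F1: one key-b increment moves through a run of key-a increments
lemma pvIncr_pvIncrs_comm (a : String) (L : List String) (d : pvWD) (b w : String)
    (hab : a ≠ b) (ha : d.contains a = true) :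
    pvIncr (pvIncrs a L d) b w = pvIncrs a L (pvIncr d b w) := by
  induction L generalizing d with
  | nil => rfl
  | cons w'' L ih =>
      rw [pvIncrs_cons, ih _ (pvContains_pvIncr_self d a w''), pvIncrs_cons,
        pvIncr_comm _ a b w'' w hab (Or.inl ha)]

-- F2: one key-a increment moves through a run of increments at keys from L (a ∉ L)
lemma pvIncr_pvIncTo_comm (c : String) (L : List String) (d : pvWD) (a w : String)
    (haL : a ∉ L) (ha : d.contains a = true) :
    pvIncr (pvIncTo c L d) a w = pvIncTo c L (pvIncr d a w) := by
  induction L generalizing d with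
  | nil => rfl
  | cons x L ih =>
      have hxa : x ≠ a := fun e => haL (e ▸ List.mem_cons_self)
      have haL' : a ∉ L := fun m => haL (List.mem_cons_of_mem _ m)
      rw [pvIncTo_cons, ih _ haL' (by rw [pvContains_pvIncr, ha, Bool.or_true]),
        pvIncr_comm d x a c w hxa (Or.inr ha), pvIncTo_cons]

-- F2': a run of key-a increments moves through a pvIncTo run
lemma pvIncrs_pvIncTo_comm (a : String) (q : List String) (c : String) (L : List String)
    (d : pvWD) (haL : a ∉ L) (ha : d.contains a = true) :
    pvIncrs a q (pvIncTo c L d) = pvIncTo c L (pvIncrs a q d) := by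
  induction q generalizing d with
  | nil => rfl
  | cons w q ih =>
      rw [pvIncrs_cons, pvIncr_pvIncTo_comm c L d a w haL ha,
        ih _ (pvContains_pvIncr_self d a w), pvIncrs_cons]

-- F3: key-a increments move through a run of ensures at keys from L (a ∉ L)
lemma pvEns_pvIncr_comm (L : List String) (d : pvWD) (a w : String)
    (haL : a ∉ L) (ha : d.contains a = true) :
    pvEns L (pvIncr d a w) = pvIncr (pvEns L d) a w := by
  induction L generalizing d with
  | nil => rfl
  | cons x L ih =>
      have hax : a ≠ x := fun e => haL (e ▸ List.mem_cons_self)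
      have haL' : a ∉ L := fun m => haL (List.mem_cons_of_mem _ m)
      rw [pvEns_cons, pvEnsure_pvIncr_comm d a x w hax ha,
        ih _ haL' (by rw [pvContains_pvEnsure, ha, Bool.or_true]), pvEns_cons]

lemma pvEns_pvIncrs_comm (L : List String) (p : List String) (d : pvWD) (a : String)
    (haL : a ∉ L) (ha : d.contains a = true) :
    pvEns L (pvIncrs a p d) = pvIncrs a p (pvEns L d) := by
  induction p generalizing d with
  | nil => rfl
  | cons w p ih =>
      rw [pvIncrs_cons, ih _ (pvContains_pvIncr_self d a w),
        pvEns_pvIncr_comm L d a w haL ha, pvIncrs_cons]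

-- G3/G4: key-a increments move through pvIncToAll
lemma pvIncToAll_pvIncr_comm (p L : List String) (d : pvWD) (a w : String)
    (haL : a ∉ L) (ha : d.contains a = true) :
    pvIncToAll p L (pvIncr d a w) = pvIncr (pvIncToAll p L d) a w := by
  induction p generalizing d with
  | nil => rfl
  | cons c p ih =>
      rw [pvIncToAll_cons', ← pvIncr_pvIncTo_comm c L d a w haL ha,
        ih _ (pvContains_pvIncTo c L d a ha), pvIncToAll_cons']

lemma pvIncToAll_pvIncrs_comm (p L : List String) (d : pvWD) (a : String) (q : List String)
    (haL : a ∉ L) (ha : d.contains a = true) :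
    pvIncToAll p L (pvIncrs a q d) = pvIncrs a q (pvIncToAll p L d) := by
  induction q generalizing d with
  | nil => rfl
  | cons w q ih =>
      rw [pvIncrs_cons, ih _ (pvContains_pvIncr_self d a w),
        pvIncToAll_pvIncr_comm p L d a w haL ha, pvIncrs_cons]

-- L3: interleaved (incr a c ; incTo c L) over p = all key-a increments first, then pvIncToAll
lemma pvInterleave (p : List String) (L : List String) (d : pvWD) (a : String)
    (haL : a ∉ L) (ha : d.contains a = true) :
    p.foldl (fun D c => pvIncTo c L (pvIncr D a c)) d
      = pvIncToAll p L (pvIncrs a p d) := by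
  induction p generalizing d with
  | nil => rfl
  | cons c p ih =>
      rw [List.foldl_cons,
        ih _ (pvContains_pvIncTo c L _ a (pvContains_pvIncr_self d a c)),
        pvIncrs_pvIncTo_comm a p c L (pvIncr d a c) haL (pvContains_pvIncr_self d a c),
        pvIncToAll_cons', pvIncrs_cons]

-- L2: B's pair pass for the pairs (a, b), b ∈ L
lemma pvPairRow (a : String) (L : List String) (d : pvWD)
    (haL : a ∉ L) (ha : d.contains a = true) :
    (L.map (fun b => (a, b))).foldl pvPairOp d = pvIncTo a L (pvIncrs a L d) := by
  induction L generalizing d with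
  | nil => rfl
  | cons b r ih =>
      have hab : a ≠ b := fun e => haL (e ▸ List.mem_cons_self)
      have haL' : a ∉ r := fun m => haL (List.mem_cons_of_mem _ m)
      rw [List.map_cons, List.foldl_cons]
      have hstart : pvPairOp d (a, b) = pvIncr (pvIncr d a b) b a := rfl
      rw [hstart, ih _ haL' (by simp [pvContains_pvIncr]),
        ← pvIncr_pvIncrs_comm a r (pvIncr d a b) b a hab (pvContains_pvIncr_self d a b),
        pvIncrs_cons, pvIncTo_cons]

-- A's guarded inner fold is a plain pvIncrs run when the key is absent from the list
lemma pvFoldIf (x : String) (L : List String) (d : pvWD) (hx : x ∉ L) :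
    L.foldl (fun d w => if w ≠ x then pvIncr d x w else d) d = pvIncrs x L d := by
  induction L generalizing d with
  | nil => rfl
  | cons w L ih =>
      have hwx : w ≠ x := fun e => hx (e ▸ List.mem_cons_self)
      have hx' : x ∉ L := fun m => hx (List.mem_cons_of_mem _ m)
      rw [List.foldl_cons, if_pos hwx, pvIncrs_cons]
      exact ih _ hx'

lemma pvIncToAll_append_singleton (p : List String) (a : String) (L : List String) (d : pvWD) :
    pvIncToAll (p ++ [a]) L d = pvIncTo a L (pvIncToAll p L d) := by
  simp [pvIncToAll, List.foldl_append]

lemma pvIncToAll_cons (p : List String) (a : String) (L : List String) (d : pvWD) :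
    pvIncToAll p (a :: L) d = p.foldl (fun D c => pvIncTo c L (pvIncr D a c)) d := by
  simp [pvIncToAll, pvIncTo, List.foldl_cons]

-- main per-sentence lemma, generalised over the already-processed prefix p
lemma pvMain (t : List String) : ∀ (p : List String) (d : pvWD),
    (p ++ t).Nodup → (∀ c ∈ p, d.contains c = true) →
    t.foldl (fun d x => ((p ++ t).foldl (fun d w => if w ≠ x then pvIncr d x w else d) (pvEnsure d x))) d
      = (pvPairs t).foldl pvPairOp (pvIncToAll p t (pvEns t d)) := by
  induction t with
  | nil =>
      intro p d _ _
      simp [pvPairs, pvEns, pvIncToAll, pvIncTo]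
  | cons a t' ih =>
      intro p d hnd hp
      have hnd' := hnd
      rw [List.nodup_append] at hnd'
      obtain ⟨hndp, hndat, hdisj⟩ := hnd'
      have hap : a ∉ p := fun m => hdisj a m a List.mem_cons_self rfl
      have hat : a ∉ t' := (List.nodup_cons.mp hndat).1
      -- the first outer iteration produces d1
      have hifa : ∀ d : pvWD, (p ++ a :: t').foldl
          (fun d w => if w ≠ a then pvIncr d a w else d) d
            = pvIncrs a t' (pvIncrs a p d) := by
        intro d
        rw [List.foldl_append, pvFoldIf a p d hap, List.foldl_cons, if_neg (by simp),
          pvFoldIf a t' _ hat]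
      set d1 : pvWD := pvIncrs a t' (pvIncrs a p (pvEnsure d a)) with hd1
      -- containment facts
      have hca : (pvEnsure d a).contains a = true := by
        rw [pvContains_pvEnsure]; simp
      have hcad1 : d1.contains a = true :=
        pvContains_pvIncrs _ _ _ _ (pvContains_pvIncrs _ _ _ _ hca)
      have hsplit : p ++ a :: t' = (p ++ [a]) ++ t' := by simp
      -- LHS: peel the first iteration and apply the IH with prefix p ++ [a]
      simp only [List.foldl_cons]
      rw [hifa (pvEnsure d a), ← hd1]
      simp only [hsplit]
      rw [ih (p ++ [a]) d1 (by rwa [← hsplit]) ?hp1]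
      case hp1 =>
        intro c hc
        rcases List.mem_append.mp hc with hcp | hca'
        · exact pvContains_pvIncrs _ _ _ _ (pvContains_pvIncrs _ _ _ _
            (by rw [pvContains_pvEnsure, hp c hcp, Bool.or_true]))
        · have : c = a := by simpa using hca'
          subst this
          exact hcad1
      -- RHS: unfold one step of pvPairs / pvEns and commute everything into place
      have hE : (pvEns (a :: t') d) = pvEns t' (pvEnsure d a) := rfl
      have hcaE : (pvEns t' (pvEnsure d a)).contains a = true :=
        pvContains_pvEns _ _ _ hca
      have hcYa : (pvIncrs a p (pvEnsure d a)).contains a = true :=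
        pvContains_pvIncrs _ _ _ _ hca
      have hc2 : (pvEns t' (pvIncrs a p (pvEnsure d a))).contains a = true :=
        pvContains_pvEns _ _ _ hcYa
      have hRHS : (pvPairs (a :: t')).foldl pvPairOp
            (pvIncToAll p (a :: t') (pvEns (a :: t') d))
          = (pvPairs t').foldl pvPairOp
            (pvIncToAll (p ++ [a]) t' (pvEns t' d1)) := by
        show ((t'.map (fun b => (a, b)) ++ pvPairs t').foldl pvPairOp
            (pvIncToAll p (a :: t') (pvEns (a :: t') d))) = _
        rw [List.foldl_append, hE, pvIncToAll_cons,
          pvInterleave p t' _ a hat hcaE]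
        rw [pvPairRow a t' _ hat
          (pvContains_pvIncToAll _ _ _ _ (pvContains_pvIncrs _ _ _ _ hcaE))]
        rw [← pvEns_pvIncrs_comm t' p (pvEnsure d a) a hat hca]
        rw [← pvIncToAll_pvIncrs_comm p t' _ a t' hat hc2]
        rw [← pvEns_pvIncrs_comm t' t' (pvIncrs a p (pvEnsure d a)) a hat hcYa]
        rw [← hd1, ← pvIncToAll_append_singleton]
      rw [hRHS]

-- per sentence, A's pass equals B's pass
lemma pvStepAB (sent : List String) (d : pvWD) :
    (PySem.Set.ofList sent).foldl (fun d x =>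
        (PySem.Set.ofList sent).foldl (fun d w => if w ≠ x then pvIncr d x w else d) (pvEnsure d x)) d
      = (pvPairs (PySem.Set.ofList sent)).foldl pvPairOp (pvEns (PySem.Set.ofList sent) d) := by
  have h := pvMain (PySem.Set.ofList sent) [] d
    (by simp [PySem.Set.nodup_ofList]) (by simp)
  simpa [pvIncToAll] using h

-- B's setdefault loop is A's guarded initialisation loop
lemma pvSetdefault_eq (d : pvWD) (w : String) :
    d.setdefault w PySem.Dict.empty = pvEnsure d w := by
  unfold pvEnsure PySem.Dict.setdefault PySem.Dict.insert
  split_ifs <;> simp_all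

lemma pvEnsB_eq (L : List String) (d : pvWD) :
    L.foldl (fun d w => d.setdefault w PySem.Dict.empty) d = pvEns L d := by
  induction L generalizing d with
  | nil => rfl
  | cons x L ih =>
      rw [List.foldl_cons, pvSetdefault_eq, pvEns_cons, ih]

-- both programs' whole-input folds agree
def pvStepA (d : pvWD) (sent : List String) : pvWD :=
  (PySem.Set.ofList sent).foldl (fun d x =>
    (PySem.Set.ofList sent).foldl (fun d w => if w ≠ x then pvIncr d x w else d) (pvEnsure d x)) d

def pvStepB (d : pvWD) (sent : List String) : pvWD :=
  (pvPairs (PySem.Set.ofList sent)).foldl pvPairOp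
    ((PySem.Set.ofList sent).foldl (fun d w => d.setdefault w PySem.Dict.empty) d)

lemma pvStepA_eq_pvStepB (d : pvWD) (sent : List String) :
    pvStepA d sent = pvStepB d sent := by
  unfold pvStepA pvStepB
  rw [pvEnsB_eq, pvStepAB]

lemma pvFold_eq (sents : List (List String)) : ∀ d : pvWD,
    sents.foldl pvStepA d = sents.foldl pvStepB d := by
  induction sents with
  | nil => intro d; rfl
  | cons s ss ih =>
      intro d
      rw [List.foldl_cons, List.foldl_cons, pvStepA_eq_pvStepB, ih]

-- ===== VERDICT (by name: the statement is the Claim_ definition above) =====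
theorem build_semantic_descriptors_spec : Claim_equal_build_semantic_descriptors := by
  intro sentences _
  unfold Spec_build_semantic_descriptors
  exact congrArg (fun d : pvWD => d.items.map (fun p => (p.1, p.2.items)))
    (pvFold_eq sentences PySem.Dict.empty)
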